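-- pv_equiv track=rewrite | github.com/rafael-branco/random-coding | HowManyShuffles.py | shuffle_count
-- ===== SOURCE A (Python) =====
-- def shuffle_count(num):
--     if num > 0 and num % 2 ==0:
--         arr = []
--         temp = []
--         for i in range(1, num + 1):
--             arr.append(i)
--             temp.append(0)
--
--         halfPosition = int(num / 2)
--
--         part1 = arr[0:halfPosition]
--         part2 = arr[halfPosition: num]
--
--         count = 0
--         while temp != arr:
--             count += 1
--             j = 0
--             k = 0
--             for i in range(0, num):
--                 if i % 2 == 0:
--                     temp[i] = part1[j]
--                     j += 1
--                 else:
--                     temp[i] = part2[k]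
--                     k += 1
--             part1 = temp[0:halfPosition]
--             part2 = temp[halfPosition: num]
--
--
--         return count
--     else:
--         return None
-- ===== SOURCE B (Python) =====
-- def shuffle_count(num):
--     if num > 0 and num % 2 == 0:
--         # The faro out-shuffle sends the card at position p to position 2p mod (num-1);
--         # the deck is restored exactly when 2^k = 1 (mod num-1), so count the
--         # multiplicative order of 2 modulo num-1 with a single modular accumulator.
--         m = num - 1
--         x = 2 % m
--         count = 1
--         while x != 1 % m:
--             x = (2 * x) % m
--             count += 1
--         return count
--     else:
--         return None
-- ===== Notes on version B (the rewrite author's own statement) =====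
-- stated objective: alternative
-- what changed: A simulates the whole deck, rebuilding all num positions on every faro shuffle until the deck returns to order; B never builds a deck: it computes the same count as the multiplicative order of two modulo num-1 with a single modular accumulator (one multiply-and-mod per shuffle).
import Mathlib
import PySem

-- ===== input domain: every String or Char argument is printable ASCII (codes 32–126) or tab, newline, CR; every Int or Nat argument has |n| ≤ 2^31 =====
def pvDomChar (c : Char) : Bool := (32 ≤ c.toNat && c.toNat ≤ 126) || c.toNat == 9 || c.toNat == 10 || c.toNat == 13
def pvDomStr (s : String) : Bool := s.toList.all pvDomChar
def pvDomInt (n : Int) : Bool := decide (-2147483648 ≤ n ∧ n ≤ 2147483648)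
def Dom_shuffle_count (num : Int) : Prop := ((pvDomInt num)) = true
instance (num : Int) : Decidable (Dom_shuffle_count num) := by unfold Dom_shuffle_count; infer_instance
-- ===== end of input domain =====

-- B replaces A's whole-deck simulation (one pass over the deck per shuffle) by a single
-- modular accumulator computing the multiplicative order of two modulo num-1: objective 'alternative'.

-- ===== PORT A =====
-- for i in range(1, num+1): arr.append(i); temp.append(0)
-- arr.append(i) / temp.append(0) are ported by consing onto accumulators that are
-- reversed once at the end of the loop: the same loop producing the same two lists.
def pvInitA (idxs : List Int) (arr temp : List Int) : List Int × List Int :=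
  match idxs with
  | [] => (arr.reverse, temp.reverse)
  | i :: rest => pvInitA rest (i :: arr) (0 :: temp)

-- for i in range(0, num): if i % 2 == 0: temp[i] = part1[j]; j += 1 else: temp[i] = part2[k]; k += 1
-- Every position temp[0..num-1] is overwritten, in increasing order, and never read during
-- the pass, so temp[i] = v is ported as consing v onto an accumulator that is reversed at
-- the end of the pass: the same loop, branch order and j/k counter values, producing the
-- same temp list. Python lists are dynamic arrays, so the indexed-only part1/part2 are
-- held as Array Int; the counters j, k start at 0 and only increase, so j.toNat/k.toNat
-- are exact, and part1[j]/part2[k] are always in range here, so Array.getD is exact.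
def pvInnerA (idxs : List Int) (part1 part2 : Array Int) (acc : List Int) (j k : Int) : List Int :=
  match idxs with
  | [] => acc.reverse
  | i :: rest =>
    if PySem.Int.mod i 2 = 0 then
      pvInnerA rest part1 part2 (part1.getD j.toNat 0 :: acc) (j + 1) k
    else
      pvInnerA rest part1 part2 (part2.getD k.toNat 0 :: acc) j (k + 1)

-- while temp != arr: … (fuel num.natAbs; the while loop always terminates within num - 1
-- iterations — the order of two modulo num-1 — so the fuel is never exhausted on any accepted input)
def pvLoopA (arr : List Int) (n halfPosition : Int) (fuel : Nat)
    (temp : List Int) (part1 part2 : Array Int) (count : Int) : Int :=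
  if temp = arr then count
  else match fuel with
    | 0 => count
    | fuel + 1 =>
      let temp' := pvInnerA (PySem.List.pyRange 0 n 1) part1 part2 [] 0 0
      pvLoopA arr n halfPosition fuel temp'
        (PySem.List.slice temp' (some 0) (some halfPosition)).toArray
        (PySem.List.slice temp' (some halfPosition) (some n)).toArray
        (count + 1)

def shuffle_count (num : Int) : Option Int :=
  if num > 0 ∧ PySem.Int.mod num 2 = 0 then
    let p := pvInitA (PySem.List.pyRange 1 (num + 1) 1) [] []
    let arr := p.1
    let temp := p.2
    let halfPosition := PySem.Int.truncdiv num 2   -- int(num/2): exact for even 0 < num ≤ 2^31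
    let part1 := (PySem.List.slice arr (some 0) (some halfPosition)).toArray
    let part2 := (PySem.List.slice arr (some halfPosition) (some num)).toArray
    some (pvLoopA arr num halfPosition num.natAbs temp part1 part2 0)
  else none

-- ===== PORT B =====
-- while x != 1 % m: x = (2 * x) % m; count += 1   (fuel num.natAbs, never exhausted)
def pvLoopB (m : Int) (fuel : Nat) (x count : Int) : Int :=
  if x = PySem.Int.mod 1 m then count
  else match fuel with
    | 0 => count
    | fuel + 1 => pvLoopB m fuel (PySem.Int.mod (2 * x) m) (count + 1)

def shuffle_count_alt (num : Int) : Option Int :=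
  if num > 0 ∧ PySem.Int.mod num 2 = 0 then
    let m := num - 1
    some (pvLoopB m num.natAbs (PySem.Int.mod 2 m) 1)
  else none

-- ===== PRECONDITION & SPEC =====
def Spec_shuffle_count (num : Int) (out : Option Int) : Prop := out = shuffle_count_alt num
instance (num : Int) (out : Option Int) : Decidable (Spec_shuffle_count num out) := by unfold Spec_shuffle_count; infer_instance

-- ===== CLAIM (what is proved, stated in full; the proofs are below) =====
def Claim_equal_shuffle_count : Prop := ∀ (num : Int), Dom_shuffle_count num → Spec_shuffle_count num (shuffle_count num)

-- ===== LEMMAS AND PROOFS =====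

theorem pvInitA_spec (l arr temp : List Int) :
    pvInitA l arr temp = (arr.reverse ++ l, temp.reverse ++ List.replicate l.length 0) := by
  induction l generalizing arr temp with
  | nil => simp [pvInitA]
  | cons x xs ih => simp [pvInitA, ih, List.replicate_succ]

def itl : List Int → List Int → List Int
  | x :: a, y :: b => x :: y :: itl a b
  | _, _ => []

theorem pvInnerA_go (hn : Nat) (p1 p2 : Array Int) (hp1 : p1.size = hn) (hp2 : p2.size = hn) :
    ∀ (d t : Nat) (acc : List Int), hn - t = d → t ≤ hn →
    pvInnerA (PySem.List.pyRange ((2*t : Nat) : Int) ((2*hn : Nat) : Int) 1) p1 p2 acc (t : Int) (t : Int)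
      = acc.reverse ++ itl (p1.toList.drop t) (p2.toList.drop t) := by
  intro d
  induction d with
  | zero =>
    intro t acc hd ht
    have ht' : t = hn := by omega
    subst ht'
    rw [PySem.List.pyRange_one_eq_nil (by omega)]
    simp [pvInnerA, itl, List.drop_of_length_le, hp1, hp2]
  | succ d ih =>
    intro t acc hd ht
    have htlt : t < hn := by omega
    have hm2 : (0:Int) < 2 := by norm_num
    rw [PySem.List.pyRange_one_cons (by push_cast; omega)]
    rw [pvInnerA]
    rw [if_pos (by rw [PySem.Int.mod_eq_emod_of_pos hm2]; omega)]
    have e1 : ((2*t : Nat) : Int) + 1 = ((2*t+1 : Nat) : Int) := by push_cast; ring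
    rw [e1]
    rw [PySem.List.pyRange_one_cons (by push_cast; omega)]
    rw [pvInnerA]
    rw [if_neg (by rw [PySem.Int.mod_eq_emod_of_pos hm2]; omega)]
    have e2 : ((2*t+1 : Nat) : Int) + 1 = ((2*(t+1) : Nat) : Int) := by push_cast; ring
    rw [e2]
    have e3 : ((t : Int) + 1) = ((t+1 : Nat) : Int) := by push_cast; ring
    rw [e3]
    rw [show ((t : Nat) : Int).toNat = t from by omega]
    rw [ih (t+1) _ (by omega) (by omega)]
    have hta : t < p1.size := by omega
    have htb : t < p2.size := by omega
    have hta' : t < p1.toList.length := by simpa using hta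
    have htb' : t < p2.toList.length := by simpa using htb
    rw [show p1.getD t 0 = p1[t] from (Array.getElem_eq_getD 0).symm,
        show p2.getD t 0 = p2[t] from (Array.getElem_eq_getD 0).symm]
    rw [List.drop_eq_getElem_cons hta', List.drop_eq_getElem_cons htb']
    rw [itl]
    simp [Array.getElem_toList]

theorem pvInnerA_spec (hn : Nat) (p1 p2 : Array Int) (hp1 : p1.size = hn) (hp2 : p2.size = hn) :
    pvInnerA (PySem.List.pyRange 0 ((2 * hn : Nat) : Int) 1) p1 p2 [] 0 0 = itl p1.toList p2.toList := by
  have := pvInnerA_go hn p1 p2 hp1 hp2 hn 0 [] (by omega) (by omega)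
  simpa using this

theorem itl_append_pair (a : List Int) : ∀ (b : List Int) (x y : Int), a.length = b.length →
    itl (a ++ [x]) (b ++ [y]) = itl a b ++ [x, y] := by
  induction a with
  | nil => intro b x y hb; cases b <;> simp_all [itl]
  | cons z a ih =>
    intro b x y hb
    cases b with
    | nil => simp at hb
    | cons w b => simp only [List.cons_append, itl, ih b x y (by simpa using hb)]

theorem itl_maps (f g' : Nat → Int) : ∀ hn, itl ((List.range hn).map f) ((List.range hn).map g')
    = (List.range (2*hn)).map (fun i => if i % 2 = 0 then f (i/2) else g' (i/2)) := by
  intro hn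
  induction hn with
  | zero => simp [itl]
  | succ n ih =>
    rw [List.range_succ]
    simp only [List.map_append, List.map_cons, List.map_nil]
    rw [itl_append_pair _ _ _ _ (by simp)]
    rw [ih]
    have : 2*(n+1) = (2*n+1)+1 := by ring
    rw [this, List.range_succ, List.range_succ]
    simp only [List.map_append, List.append_assoc]
    congr 1
    have h1 : (2*n) % 2 = 0 := by omega
    simp [h1]
    congr 1
    omega

def gfun (h k i : Nat) : Nat := if i = 2*h - 1 then 2*h - 1 else (h ^ k * i) % (2*h - 1)

def Tlist (h k : Nat) : List Int := (List.range (2*h)).map (fun i => ((gfun h k i : Nat) : Int) + 1)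

theorem pvTlist_length (h k : Nat) : (Tlist h k).length = 2 * h := by simp [Tlist]

theorem gfun_step (h k i : Nat) (hh : 1 ≤ h) (hi : i < 2*h) :
    gfun h (k+1) i = if i % 2 = 0 then gfun h k (i/2) else gfun h k (h + i/2) := by
  set m := 2*h - 1 with hm
  have hmod1 : (2*h) % m = 1 % m := by
    have : 2*h = 1 + m := by omega
    rw [this, Nat.add_mod_right]
  by_cases hpar : i % 2 = 0
  · rw [if_pos hpar]
    have him : i ≠ m := by omega
    have hi2m : i / 2 ≠ m := by omega
    rw [gfun, if_neg him, gfun, if_neg hi2m]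
    have hiev : i = 2 * (i / 2) := by omega
    have key : h ^ (k+1) * i = (h ^ k * (i / 2)) * (2 * h) := by
      calc h ^ (k+1) * i = h ^ (k+1) * (2 * (i/2)) := by rw [← hiev]
        _ = (h ^ k * (i / 2)) * (2 * h) := by ring
    rw [key]
    calc (h ^ k * (i / 2) * (2 * h)) % m
        = (h ^ k * (i / 2) % m) * ((2*h) % m) % m := by rw [Nat.mul_mod]
      _ = (h ^ k * (i / 2) % m) * (1 % m) % m := by rw [hmod1]
      _ = (h ^ k * (i / 2)) * 1 % m := by rw [← Nat.mul_mod]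
      _ = (h ^ k * (i / 2)) % m := by rw [Nat.mul_one]
  · rw [if_neg hpar]
    by_cases him : i = m
    · rw [gfun, if_pos him, gfun, if_pos (show h + i/2 = 2*h - 1 by omega)]
    · have hi2 : i ≤ 2*h - 3 := by omega
      have h3 : h + i / 2 ≠ m := by omega
      rw [gfun, if_neg him, gfun, if_neg h3]
      have key : h * i = m * (i / 2) + (h + i / 2) := by
        have : i = 2 * (i/2) + 1 := by omega
        calc h * i = h * (2 * (i/2) + 1) := by rw [← this]
          _ = (2*h) * (i/2) + h := by ring
          _ = (m + 1) * (i/2) + h := by rw [show m + 1 = 2*h by omega]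
          _ = m * (i / 2) + (h + i / 2) := by ring
      rw [show h ^ (k+1) * i = h ^ k * (h * i) from by ring]
      calc (h ^ k * (h * i)) % m
          = (h ^ k % m) * ((h * i) % m) % m := by rw [Nat.mul_mod]
        _ = (h ^ k % m) * ((h + i / 2) % m) % m := by
              rw [key, Nat.add_comm (m * (i/2)), Nat.add_mul_mod_self_left]
        _ = (h ^ k * (h + i / 2)) % m := by rw [← Nat.mul_mod]

theorem pvStepT (h k : Nat) (hh : 1 ≤ h) :
    itl ((Tlist h k).take h) ((Tlist h k).drop h) = Tlist h (k + 1) := by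
  unfold Tlist
  rw [show 2*h = h+h from by ring]
  rw [← List.map_take, ← List.map_drop, List.take_range,
      show min h (h+h) = h from by omega]
  rw [show (List.range (h+h)).drop h = (List.range h).map (h + ·) from by
        rw [List.range_add, List.drop_left' (by simp)]]
  rw [List.map_map, itl_maps]
  rw [show 2*h = h+h from by ring]
  apply List.map_congr_left
  intro i hi
  have hi2 : i < 2*h := by have := List.mem_range.1 hi; omega
  rw [gfun_step h k i hh hi2]
  by_cases hpar : i % 2 = 0 <;> simp [hpar, Function.comp]

theorem pow_h_iff_pow_two (h k : Nat) (hh : 1 ≤ h) :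
    h ^ k % (2*h - 1) = 1 % (2*h - 1) ↔ 2 ^ k % (2*h - 1) = 1 % (2*h - 1) := by
  set m := 2*h - 1 with hm
  have e : (2*h) ≡ 1 [MOD m] := by
    show (2*h) % m = 1 % m
    rw [show 2*h = 1 + m from by omega, Nat.add_mod_right]
  have epow : 2 ^ k * h ^ k ≡ 1 [MOD m] := by
    have := e.pow k
    rwa [mul_pow, one_pow] at this
  constructor
  · intro hk
    have h1 : h ^ k ≡ 1 [MOD m] := hk
    calc 2 ^ k ≡ 2 ^ k * h ^ k [MOD m] := by
          have := Nat.ModEq.mul_left (2 ^ k) h1.symm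
          simpa using this
      _ ≡ 1 [MOD m] := epow
  · intro hk
    have h1 : 2 ^ k ≡ 1 [MOD m] := hk
    calc h ^ k ≡ h ^ k * 2 ^ k [MOD m] := by
          have := Nat.ModEq.mul_left (h ^ k) h1.symm
          simpa using this
      _ ≡ 2 ^ k * h ^ k [MOD m] := by rw [mul_comm]
      _ ≡ 1 [MOD m] := epow

theorem gfun_zero (h i : Nat) (hi : i < 2*h) : gfun h 0 i = i := by
  unfold gfun
  by_cases him : i = 2*h - 1
  · simp [him]
  · rw [if_neg him, pow_zero, one_mul, Nat.mod_eq_of_lt (by omega)]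

theorem pvTk_eq_T0_iff (h k : Nat) (hh : 1 ≤ h) :
    Tlist h k = Tlist h 0 ↔ 2 ^ k % (2*h - 1) = 1 % (2*h - 1) := by
  rw [← pow_h_iff_pow_two h k hh]
  unfold Tlist
  rw [List.map_eq_map_iff]
  constructor
  · intro hall
    by_cases h1 : h = 1
    · subst h1; simp
    · have h2 : 2 ≤ h := by omega
      have := hall 1 (List.mem_range.2 (by omega))
      have hg : gfun h k 1 = gfun h 0 1 := by exact_mod_cast (add_left_injective 1 this)
      rw [gfun_zero h 1 (by omega)] at hg
      rw [gfun, if_neg (by omega)] at hg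
      rw [mul_one] at hg
      rw [hg, Nat.mod_eq_of_lt (by omega)]
  · intro hpow i hi
    have hi2 : i < 2*h := List.mem_range.1 hi
    congr 1
    rw [gfun_zero h i hi2]
    unfold gfun
    by_cases him : i = 2*h - 1
    · simp [him]
    · rw [if_neg him]
      have hilt : i < 2*h - 1 := by omega
      have goal : (h ^ k * i) % (2*h-1) = i := by
        calc (h ^ k * i) % (2*h-1)
            = (h ^ k % (2*h-1)) * i % (2*h-1) := (Nat.mod_mul_mod _ _ _).symm
          _ = (1 % (2*h-1)) * i % (2*h-1) := by rw [hpow]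
          _ = 1 * i % (2*h-1) := Nat.mod_mul_mod _ _ _
          _ = i := by rw [one_mul, Nat.mod_eq_of_lt hilt]
      exact_mod_cast goal

theorem pvExStop (h : Nat) (hh : 1 ≤ h) : ∃ k, 0 < k ∧ 2 ^ k % (2*h - 1) = 1 % (2*h - 1) := by
  refine ⟨(2*h - 1).totient, Nat.totient_pos.2 (by omega), ?_⟩
  have hc : Nat.Coprime 2 (2*h - 1) := Nat.coprime_two_left.2 ⟨h - 1, by omega⟩
  exact Nat.ModEq.pow_totient hc

def ordh (h : Nat) (hh : 1 ≤ h) : Nat := Nat.find (pvExStop h hh)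

theorem pvLoopA_run (h : Nat) (hh : 1 ≤ h) (fuel : Nat) : ∀ (k : Nat), 1 ≤ k →
    k ≤ ordh h hh → ordh h hh ≤ k + fuel →
    pvLoopA (Tlist h 0) ((2*h : Nat) : Int) ((h : Nat) : Int) fuel
      (Tlist h k) ((Tlist h k).take h).toArray ((Tlist h k).drop h).toArray (k : Int)
      = ((ordh h hh : Nat) : Int) := by
  induction fuel with
  | zero =>
    intro k hk hko hf
    have hke : k = ordh h hh := by omega
    have hstop : Tlist h k = Tlist h 0 := by
      rw [pvTk_eq_T0_iff h k hh, hke]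
      exact (Nat.find_spec (pvExStop h hh)).2
    rw [pvLoopA, if_pos hstop, hke]
  | succ fuel ih =>
    intro k hk hko hf
    by_cases hstop : Tlist h k = Tlist h 0
    · have hord_le : ordh h hh ≤ k :=
        Nat.find_min' (pvExStop h hh) ⟨by omega, (pvTk_eq_T0_iff h k hh).1 hstop⟩
      have hke : k = ordh h hh := by omega
      rw [pvLoopA, if_pos hstop, hke]
    · have hklt : k < ordh h hh := by
        rcases Nat.lt_or_ge k (ordh h hh) with hlt | hge
        · exact hlt
        · exfalso
          have : k = ordh h hh := by omega
          apply hstop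
          rw [pvTk_eq_T0_iff h k hh, this]
          exact (Nat.find_spec (pvExStop h hh)).2
      rw [pvLoopA, if_neg hstop]
      have hinner : pvInnerA (PySem.List.pyRange 0 ((2*h : Nat) : Int) 1)
          ((Tlist h k).take h).toArray ((Tlist h k).drop h).toArray [] 0 0 = Tlist h (k+1) := by
        rw [pvInnerA_spec h _ _ (by rw [List.size_toArray, List.length_take, pvTlist_length]; omega)
          (by rw [List.size_toArray, List.length_drop, pvTlist_length]; omega)]
        exact pvStepT h k hh
      simp only [hinner]
      have hs1 : PySem.List.slice (Tlist h (k+1)) (some 0) (some ((h : Nat) : Int))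
          = (Tlist h (k+1)).take h := by
        rw [PySem.List.slice_zero_start, PySem.List.slice_to_natCast]
      have hs2 : PySem.List.slice (Tlist h (k+1)) (some ((h : Nat) : Int)) (some ((2*h : Nat) : Int))
          = (Tlist h (k+1)).drop h := by
        rw [PySem.List.slice_natCast]
        apply List.take_of_length_le
        rw [List.length_drop, pvTlist_length]
      rw [hs1, hs2]
      have hc : (k : Int) + 1 = ((k+1 : Nat) : Int) := by push_cast; ring
      rw [hc]
      exact ih (k+1) (by omega) (by omega) (by omega)

theorem pvLoopB_run (h : Nat) (hh : 1 ≤ h) (fuel : Nat) : ∀ (k : Nat), 1 ≤ k →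
    k ≤ ordh h hh → ordh h hh ≤ k + fuel →
    pvLoopB ((2*h - 1 : Nat) : Int) fuel ((2 ^ k % (2*h - 1) : Nat) : Int) (k : Int)
      = ((ordh h hh : Nat) : Int) := by
  induction fuel with
  | zero =>
    intro k hk hko hf
    have hke : k = ordh h hh := by omega
    have hstop : ((2 ^ k % (2*h - 1) : Nat) : Int) = PySem.Int.mod 1 ((2*h - 1 : Nat) : Int) := by
      rw [show (1 : Int) = ((1 : Nat) : Int) from rfl, PySem.Int.mod_natCast]
      exact_mod_cast congrArg (Nat.cast : Nat → Int) (by rw [hke]; exact (Nat.find_spec (pvExStop h hh)).2)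
    rw [pvLoopB, if_pos hstop, hke]
  | succ fuel ih =>
    intro k hk hko hf
    by_cases hstop : 2 ^ k % (2*h - 1) = 1 % (2*h - 1)
    · have hord_le : ordh h hh ≤ k := Nat.find_min' (pvExStop h hh) ⟨by omega, hstop⟩
      have hke : k = ordh h hh := by omega
      have hstop' : ((2 ^ k % (2*h - 1) : Nat) : Int) = PySem.Int.mod 1 ((2*h - 1 : Nat) : Int) := by
        rw [show (1 : Int) = ((1 : Nat) : Int) from rfl, PySem.Int.mod_natCast]
        exact_mod_cast congrArg (Nat.cast : Nat → Int) hstop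
      rw [pvLoopB, if_pos hstop', hke]
    · have hklt : k < ordh h hh := by
        rcases Nat.lt_or_ge k (ordh h hh) with hlt | hge
        · exact hlt
        · exact absurd (by rw [show k = ordh h hh from by omega]; exact (Nat.find_spec (pvExStop h hh)).2) hstop
      have hstop' : ¬ ((2 ^ k % (2*h - 1) : Nat) : Int) = PySem.Int.mod 1 ((2*h - 1 : Nat) : Int) := by
        rw [show (1 : Int) = ((1 : Nat) : Int) from rfl, PySem.Int.mod_natCast]
        exact_mod_cast fun hc => hstop (by exact_mod_cast hc)
      rw [pvLoopB, if_neg hstop']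
      have hx : PySem.Int.mod (2 * ((2 ^ k % (2*h - 1) : Nat) : Int)) ((2*h - 1 : Nat) : Int)
          = ((2 ^ (k+1) % (2*h - 1) : Nat) : Int) := by
        rw [show (2 : Int) * ((2 ^ k % (2*h - 1) : Nat) : Int) = ((2 * (2 ^ k % (2*h - 1)) : Nat) : Int) from by push_cast; ring]
        rw [PySem.Int.mod_natCast]
        congr 1
        rw [Nat.mul_mod, Nat.mod_mod, ← Nat.mul_mod, pow_succ, mul_comm]
      rw [hx, show (k : Int) + 1 = ((k+1 : Nat) : Int) from by push_cast; ring]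
      exact ih (k+1) (by omega) (by omega) (by omega)

theorem pv_main (num : Int) : shuffle_count num = shuffle_count_alt num := by
  unfold shuffle_count shuffle_count_alt
  by_cases hc : num > 0 ∧ PySem.Int.mod num 2 = 0
  · rw [if_pos hc, if_pos hc]
    obtain ⟨hpos, heven⟩ := hc
    rw [PySem.Int.mod_eq_emod_of_pos (by norm_num : (0:Int) < 2)] at heven
    set h : Nat := num.toNat / 2 with hdefh
    have hh : 1 ≤ h := by omega
    have hN2 : num = ((2*h : Nat) : Int) := by omega
    have hord1 : 1 ≤ ordh h hh := (Nat.find_spec (pvExStop h hh)).1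
    have hordm : ordh h hh ≤ 2*h - 1 := by
      have h1 : ordh h hh ≤ (2*h - 1).totient :=
        Nat.find_min' (pvExStop h hh)
          ⟨Nat.totient_pos.2 (by omega), Nat.ModEq.pow_totient (Nat.coprime_two_left.2 ⟨h - 1, by omega⟩)⟩
      exact h1.trans (Nat.totient_le _)
    -- A side
    rw [pvInitA_spec]
    simp only [List.reverse_nil, List.nil_append]
    have hlenR : (PySem.List.pyRange 1 (num + 1) 1).length = 2*h := by
      rw [PySem.List.length_pyRange_one]; omega
    have hArr : PySem.List.pyRange 1 (num + 1) 1 = Tlist h 0 := by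
      rw [PySem.List.pyRange_one, Tlist]
      rw [show ((num + 1 - 1).toNat) = 2*h from by omega]
      apply List.map_congr_left
      intro i hi
      rw [gfun_zero h i (List.mem_range.1 hi)]
      ring
    rw [hlenR, hArr]
    have htemp0 : List.replicate (2*h) (0 : Int) ≠ Tlist h 0 := by
      intro heq
      have := congrArg (fun l => l[0]?) heq
      simp only [Tlist] at this
      rw [List.getElem?_replicate] at this
      rw [List.getElem?_map, List.getElem?_range (by omega)] at this
      simp [gfun_zero h 0 (by omega)] at this
    have hhalf : PySem.Int.truncdiv num 2 = ((h : Nat) : Int) := by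
      rw [hN2]; simp [PySem.Int.truncdiv]
    rw [hhalf]
    have hs1 : PySem.List.slice (Tlist h 0) (some 0) (some ((h : Nat) : Int))
        = (Tlist h 0).take h := by
      rw [PySem.List.slice_zero_start, PySem.List.slice_to_natCast]
    have hs2 : PySem.List.slice (Tlist h 0) (some ((h : Nat) : Int)) (some num)
        = (Tlist h 0).drop h := by
      rw [hN2, PySem.List.slice_natCast]
      apply List.take_of_length_le
      rw [List.length_drop, pvTlist_length]
    rw [hs1, hs2]
    rw [pvLoopA.eq_def, if_neg htemp0]
    rw [show num.natAbs = (2*h - 1) + 1 from by omega]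
    have hinner : pvInnerA (PySem.List.pyRange 0 num 1)
        ((Tlist h 0).take h).toArray ((Tlist h 0).drop h).toArray [] 0 0
        = Tlist h 1 := by
      rw [hN2]
      rw [pvInnerA_spec h _ _ (by rw [List.size_toArray, List.length_take, pvTlist_length]; omega)
        (by rw [List.size_toArray, List.length_drop, pvTlist_length]; omega)]
      exact pvStepT h 0 hh
    simp only [hinner]
    have hs1' : PySem.List.slice (Tlist h 1) (some 0) (some ((h : Nat) : Int))
        = (Tlist h 1).take h := by
      rw [PySem.List.slice_zero_start, PySem.List.slice_to_natCast]
    have hs2' : PySem.List.slice (Tlist h 1) (some ((h : Nat) : Int)) (some num)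
        = (Tlist h 1).drop h := by
      rw [hN2, PySem.List.slice_natCast]
      apply List.take_of_length_le
      rw [List.length_drop, pvTlist_length]
    rw [hs1', hs2']
    rw [show (0 : Int) + 1 = ((1 : Nat) : Int) from by norm_num]
    rw [hN2]
    rw [pvLoopA_run h hh (2*h - 1) 1 (by omega) (by omega) (by omega)]
    -- B side
    have hm1 : ((2*h : Nat) : Int) - 1 = ((2*h - 1 : Nat) : Int) := by push_cast [hh]; omega
    rw [hm1]
    rw [show (2 : Int) = ((2 : Nat) : Int) from rfl, PySem.Int.mod_natCast]
    rw [show (2 : Nat) % (2*h - 1) = 2 ^ 1 % (2*h - 1) from by rw [pow_one]]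
    rw [show (1 : Int) = ((1 : Nat) : Int) from rfl]
    rw [pvLoopB_run h hh (2*h - 1 + 1) 1 (by omega) (by omega) (by omega)]
  · rw [if_neg hc, if_neg hc]

-- ===== VERDICT (by name: the statement is the Claim_ definition above) =====
theorem shuffle_count_spec : Claim_equal_shuffle_count := by
  intro num _
  unfold Spec_shuffle_count
  exact pv_main num
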